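-- pv_equiv track=rewrite | github.com/ryanbritodev/python | dia12/matriz/matrizes.py | matrizValida
-- ===== SOURCE A (Python) =====
-- def matrizValida(matriz):
--     if not matriz:
--         return "Matriz inválida"
--     tamanho_linha = len(matriz[0])
--     for linha in matriz:
--         if len(linha) != tamanho_linha:
--             return "Matriz inválida"
--     return "Matriz válida"
-- ===== SOURCE B (Python) =====
-- def matrizValida(matriz):
--     if not matriz:
--         return "Matriz inválida"
--     tamanhos = {len(linha) for linha in matriz}
--     return "Matriz válida" if len(tamanhos) == 1 else "Matriz inválida"
-- ===== Notes on version B (the rewrite author's own statement) =====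
-- stated objective: simpler
-- what changed: Replaces the reference-length early-exit loop with a set comprehension of all row lengths and a single cardinality test (uniform iff exactly one distinct length).
import Mathlib
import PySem

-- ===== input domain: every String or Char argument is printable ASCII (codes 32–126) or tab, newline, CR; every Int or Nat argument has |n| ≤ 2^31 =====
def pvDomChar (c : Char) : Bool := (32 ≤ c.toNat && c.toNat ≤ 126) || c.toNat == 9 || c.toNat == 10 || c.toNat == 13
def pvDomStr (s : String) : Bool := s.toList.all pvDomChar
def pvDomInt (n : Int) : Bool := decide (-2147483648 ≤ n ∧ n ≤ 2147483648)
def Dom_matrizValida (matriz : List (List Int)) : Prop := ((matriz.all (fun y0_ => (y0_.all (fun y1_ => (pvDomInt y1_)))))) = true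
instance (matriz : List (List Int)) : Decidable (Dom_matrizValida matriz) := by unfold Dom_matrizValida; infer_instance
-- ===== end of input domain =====

-- B replaces A's reference-length early-exit loop by a set of all row lengths and one cardinality test (simpler).

-- ===== PORT A =====
-- A's for-loop with early return: recursion over the rows, comparing to the fixed first-row length.
def matrizValidaLoop (tamanho_linha : Nat) : List (List Int) → String
  | [] => "Matriz válida"
  | linha :: rest =>
      if linha.length ≠ tamanho_linha then "Matriz inválida"
      else matrizValidaLoop tamanho_linha rest

def matrizValida (matriz : List (List Int)) : String :=
  match matriz with
  | [] => "Matriz inválida"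
  | primeira :: _ => matrizValidaLoop primeira.length matriz

-- ===== PORT B =====
def matrizValida_alt (matriz : List (List Int)) : String :=
  match matriz with
  | [] => "Matriz inválida"
  | _ =>
      let tamanhos : PySem.Set Nat := PySem.Set.ofList (matriz.map (fun linha => linha.length))
      if tamanhos.length = 1 then "Matriz válida" else "Matriz inválida"

-- ===== PRECONDITION & SPEC =====
def Spec_matrizValida (matriz : List (List Int)) (out : String) : Prop := out = matrizValida_alt matriz
instance (matriz : List (List Int)) (out : String) : Decidable (Spec_matrizValida matriz out) := by unfold Spec_matrizValida; infer_instance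

-- ===== CLAIM (what is proved, stated in full; the proofs are below) =====
def Claim_equal_matrizValida : Prop := ∀ (matriz : List (List Int)), Dom_matrizValida matriz → Spec_matrizValida matriz (matrizValida matriz)

-- ===== LEMMAS AND PROOFS =====

theorem matrizValidaLoop_eq (t : Nat) (rows : List (List Int)) :
    matrizValidaLoop t rows =
      if ∀ l ∈ rows, l.length = t then "Matriz válida" else "Matriz inválida" := by
  induction rows with
  | nil => simp [matrizValidaLoop]
  | cons h rest ih =>
      simp only [matrizValidaLoop, ih, List.mem_cons]
      by_cases hh : h.length = t
      · simp [hh]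
      · simp [hh]

theorem set_len_one_iff (t : Nat) (xs : List Nat) :
    (PySem.Set.ofList (t :: xs)).length = 1 ↔ ∀ x ∈ xs, x = t := by
  rw [PySem.Set.ofList_cons, List.length_cons]
  have hnil : (PySem.Set.ofList xs).discard t = [] ↔ ∀ x ∈ xs, x = t := by
    rw [List.eq_nil_iff_forall_not_mem]
    constructor
    · intro h x hx
      by_contra hne
      exact h x ((PySem.Set.mem_discard _ _ _).mpr
        ⟨(PySem.Set.mem_ofList _ _).mpr hx, hne⟩)
    · intro h x hx
      obtain ⟨hm, hne⟩ := (PySem.Set.mem_discard _ _ _).mp hx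
      exact hne (h x ((PySem.Set.mem_ofList _ _).mp hm))
  rw [← hnil, ← List.length_eq_zero_iff]
  omega

theorem cond_iff (primeira : List Int) (rest : List (List Int)) :
    (∀ l ∈ primeira :: rest, l.length = primeira.length)
      ↔ (∀ x ∈ rest.map (fun l => l.length), x = primeira.length) := by
  constructor
  · intro h x hx
    obtain ⟨l, hl, rfl⟩ := List.mem_map.mp hx
    exact h l (List.mem_cons_of_mem _ hl)
  · intro h l hl
    rcases List.mem_cons.mp hl with rfl | hl
    · rfl
    · exact h l.length (List.mem_map_of_mem hl)

-- ===== VERDICT (by name: the statement is the Claim_ definition above) =====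
theorem matrizValida_spec : Claim_equal_matrizValida := by
  intro matriz _
  unfold Spec_matrizValida
  match matriz with
  | [] => rfl
  | primeira :: rest =>
      show matrizValidaLoop primeira.length (primeira :: rest) = _
      rw [matrizValidaLoop_eq]
      simp only [matrizValida_alt, List.map_cons, set_len_one_iff]
      simp only [cond_iff]
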